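-- pv_equiv track=rewrite | github.com/elgin9507/adventofcode | 2024/day12/part2.py | calculate_sides
-- ===== SOURCE A (Python) =====
-- def calculate_sides(locations: set[tuple]) -> int:
--     locations = set(locations)
--
--     def test(coords):
--         res = []
--         for i, j in coords:
--             res.append((i, j) in locations)
--         return list(map(int, res))
--
--     mini, maxi = 0, max(x for x, _ in locations) + 1
--     minj, maxj = 0, max(y for _, y in locations) + 1
--
--     ans = 0
--     for i in range(mini - 1, maxi):
--         for j in range(minj - 1, maxj):
--             res = test([(i, j), (i, j + 1), (i + 1, j), (i + 1, j + 1)])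
--             has_corner = res in [
--                 [1, 0, 0, 0],
--                 [0, 1, 0, 0],
--                 [0, 0, 1, 0],
--                 [0, 0, 0, 1],
--                 [1, 1, 1, 0],
--                 [1, 1, 0, 1],
--                 [1, 0, 1, 1],
--                 [0, 1, 1, 1],
--             ]
--             has_double_corner = res in [[1, 0, 0, 1], [0, 1, 1, 0]]
--             ans += has_corner + has_double_corner * 2
--
--     return ans
-- ===== SOURCE B (Python) =====
-- def calculate_sides(locations: set[tuple]) -> int:
--     locs = set(locations)
--
--     # collect only the 2x2 windows adjacent to an actual cell (A scans the
--     # whole bounding rectangle starting at row/column -1, so windows with a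
--     # coordinate below -1 are never counted there either)
--     windows = set()
--     for x, y in locs:
--         for dx in (-1, 0):
--             for dy in (-1, 0):
--                 i, j = x + dx, y + dy
--                 if i >= -1 and j >= -1:
--                     windows.add((i, j))
--
--     ans = 0
--     for i, j in windows:
--         a = (i, j) in locs
--         b = (i, j + 1) in locs
--         c = (i + 1, j) in locs
--         d = (i + 1, j + 1) in locs
--         n = a + b + c + d
--         if n == 1 or n == 3:
--             ans += 1
--         elif n == 2 and a == d:
--             ans += 2
--     return ans
-- ===== Notes on version B (the rewrite author's own statement) =====
-- stated objective: faster
-- what changed: Instead of scanning every 2x2 window of the whole bounding rectangle from (-1,-1) up to the maxima, B collects into a set only the (deduplicated) 2x2 windows adjacent to an actual cell (keeping A's scan floor of row/column -1) and scores just those, replacing the pattern-list lookup by a popcount test.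
import Mathlib
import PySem

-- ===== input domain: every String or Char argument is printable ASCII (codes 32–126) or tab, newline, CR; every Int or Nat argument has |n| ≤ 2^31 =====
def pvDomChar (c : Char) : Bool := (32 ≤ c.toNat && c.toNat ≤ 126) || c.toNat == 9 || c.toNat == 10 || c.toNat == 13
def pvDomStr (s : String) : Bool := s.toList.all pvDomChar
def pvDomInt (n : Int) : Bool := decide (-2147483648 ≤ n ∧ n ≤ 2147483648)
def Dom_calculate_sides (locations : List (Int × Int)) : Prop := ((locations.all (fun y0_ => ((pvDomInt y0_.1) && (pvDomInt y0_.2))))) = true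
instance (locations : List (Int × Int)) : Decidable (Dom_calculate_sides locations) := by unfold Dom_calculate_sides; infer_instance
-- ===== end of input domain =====

-- B replaces A's scan of the whole bounding rectangle by a scan of only the (deduplicated)
-- 2x2 windows adjacent to an actual cell, with A's scan floor of row/column -1 kept.

-- ===== PORT A =====
-- the inner helper `test`: membership of each coordinate in the set, mapped to int
def pvTestA (L : PySem.Set (Int × Int)) (coords : List (Int × Int)) : List Int :=
  (coords.foldl (fun res c => res ++ [PySem.Set.contains L c]) []).map
    (fun b => if b then (1 : Int) else 0)

def pvScoreA (L : PySem.Set (Int × Int)) (i j : Int) : Int :=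
  let res := pvTestA L [(i, j), (i, j + 1), (i + 1, j), (i + 1, j + 1)]
  let has_corner : Bool := decide (res ∈
    [[1, 0, 0, 0], [0, 1, 0, 0], [0, 0, 1, 0], [0, 0, 0, 1],
     [1, 1, 1, 0], [1, 1, 0, 1], [1, 0, 1, 1], [0, 1, 1, 1]])
  let has_double_corner : Bool := decide (res ∈ [[1, 0, 0, 1], [0, 1, 1, 0]])
  (if has_corner then 1 else 0) + (if has_double_corner then 1 else 0) * 2

def calculate_sides (locations : List (Int × Int)) : Int :=
  let L : PySem.Set (Int × Int) := PySem.Set.ofList locations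
  -- max(...) raises ValueError on an empty set: Pre_ excludes locations = []
  match PySem.List.max? (L.map (fun p => p.1)) (fun x => x),
        PySem.List.max? (L.map (fun p => p.2)) (fun x => x) with
  | some mx, some my =>
      (PySem.List.pyRange (0 - 1) (mx + 1) 1).foldl (fun ans i =>
        (PySem.List.pyRange (0 - 1) (my + 1) 1).foldl (fun ans j =>
          ans + pvScoreA L i j) ans) 0
  | _, _ => 0

-- ===== PORT B =====
def pvScoreB (L : PySem.Set (Int × Int)) (i j : Int) : Int :=
  let a := PySem.Set.contains L (i, j)
  let b := PySem.Set.contains L (i, j + 1)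
  let c := PySem.Set.contains L (i + 1, j)
  let d := PySem.Set.contains L (i + 1, j + 1)
  let n : Int := (if a then 1 else 0) + (if b then 1 else 0)
    + (if c then 1 else 0) + (if d then 1 else 0)
  if n = 1 ∨ n = 3 then 1 else if n = 2 ∧ a = d then 2 else 0

def calculate_sides_alt (locations : List (Int × Int)) : Int :=
  let L : PySem.Set (Int × Int) := PySem.Set.ofList locations
  let W : PySem.Set (Int × Int) :=
    L.foldl (fun w p =>
      [(-1 : Int), 0].foldl (fun w dx =>
        [(-1 : Int), 0].foldl (fun w dy =>
          if p.1 + dx ≥ -1 ∧ p.2 + dy ≥ -1 then PySem.Set.add w (p.1 + dx, p.2 + dy)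
          else w) w) w)
      PySem.Set.empty
  W.foldl (fun ans w => ans + pvScoreB L w.1 w.2) 0

-- ===== PRECONDITION & SPEC =====
-- Pre_ excludes only the empty input, on which Python's max() raises ValueError.
def Pre_calculate_sides (locations : List (Int × Int)) : Prop := locations ≠ []
instance (locations : List (Int × Int)) : Decidable (Pre_calculate_sides locations) := by
  unfold Pre_calculate_sides; infer_instance
def pvWitness_calculate_sides : (List (Int × Int)) := [(1, 2), (1, 3), (2, 2)]

def Spec_calculate_sides (locations : List (Int × Int)) (out : Int) : Prop := out = calculate_sides_alt locations
instance (locations : List (Int × Int)) (out : Int) : Decidable (Spec_calculate_sides locations out) := by unfold Spec_calculate_sides; infer_instance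

-- ===== CLAIM (what is proved, stated in full; the proofs are below) =====
def Claim_equal_calculate_sides : Prop := ∀ (locations : List (Int × Int)), Dom_calculate_sides locations → Pre_calculate_sides locations → Spec_calculate_sides locations (calculate_sides locations)

-- ===== LEMMAS AND PROOFS =====

def pvCand (p : Int × Int) : List (Int × Int) :=
  [(p.1 + -1, p.2 + -1), (p.1 + -1, p.2 + 0), (p.1 + 0, p.2 + -1), (p.1 + 0, p.2 + 0)].filter
    (fun w => decide (w.1 ≥ -1) && decide (w.2 ≥ -1))

def pvRect (mx my : Int) : List (Int × Int) :=
  (PySem.List.pyRange (0 - 1) (mx + 1) 1).flatMap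
    (fun i => (PySem.List.pyRange (0 - 1) (my + 1) 1).map (fun j => (i, j)))

-- B's conditional nested adds for one cell are exactly the filtered candidate list
lemma pvStep (w : PySem.Set (Int × Int)) (p : Int × Int) :
    ([(-1 : Int), 0].foldl (fun w dx =>
      [(-1 : Int), 0].foldl (fun w dy =>
        if p.1 + dx ≥ -1 ∧ p.2 + dy ≥ -1 then PySem.Set.add w (p.1 + dx, p.2 + dy)
        else w) w) w)
    = (pvCand p).foldl PySem.Set.add w := by
  by_cases h1 : -1 ≤ p.1 + -1 <;> by_cases h2 : -1 ≤ p.1 <;>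
  by_cases h3 : -1 ≤ p.2 + -1 <;> by_cases h4 : -1 ≤ p.2 <;>
  simp [pvCand, List.foldl, h1, h2, h3, h4]

lemma pvFoldl_cand (L : List (Int × Int)) (s : PySem.Set (Int × Int)) :
    L.foldl (fun w p => (pvCand p).foldl PySem.Set.add w) s
    = (L.flatMap pvCand).foldl PySem.Set.add s := by
  induction L generalizing s with
  | nil => rfl
  | cons p t ih => simp [List.flatMap_cons, List.foldl_append, ih]

lemma pvScoreB_eq_scoreA (L : PySem.Set (Int × Int)) (i j : Int) :
    pvScoreB L i j = pvScoreA L i j := by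
  by_cases hA : (i, j) ∈ L <;>
  by_cases hB : (i, j + 1) ∈ L <;>
  by_cases hC : (i + 1, j) ∈ L <;>
  by_cases hD : (i + 1, j + 1) ∈ L <;>
  simp [pvScoreB, pvScoreA, pvTestA, hA, hB, hC, hD]

lemma pvB_fold_sum (L : PySem.Set (Int × Int)) (W : List (Int × Int)) :
    W.foldl (fun ans w => ans + pvScoreB L w.1 w.2) 0
    = (W.map (fun w => pvScoreA L w.1 w.2)).sum := by
  rw [PySem.List.foldl_add]
  have : ∀ w : Int × Int, pvScoreB L w.1 w.2 = pvScoreA L w.1 w.2 := fun w => pvScoreB_eq_scoreA L w.1 w.2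
  simp [pvScoreB_eq_scoreA]

lemma pvSum_flatMap {α : Type} (l : List α) (f : α → List Int) :
    (l.flatMap f).sum = (l.map (fun a => (f a).sum)).sum := by
  induction l with
  | nil => rfl
  | cons a t ih => simp [List.flatMap_cons, List.sum_append, ih]

lemma pvA_fold_sum (L : PySem.Set (Int × Int)) (mx my : Int) :
    (PySem.List.pyRange (0 - 1) (mx + 1) 1).foldl (fun ans i =>
      (PySem.List.pyRange (0 - 1) (my + 1) 1).foldl (fun ans j =>
        ans + pvScoreA L i j) ans) 0
    = ((pvRect mx my).map (fun w => pvScoreA L w.1 w.2)).sum := by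
  simp only [PySem.List.foldl_add, pvRect, List.map_flatMap, List.map_map]
  simp [pvSum_flatMap, Function.comp_def]

lemma pvSum_eq_of_zero_off {α : Type} [DecidableEq α] (R S : List α) (f : α → Int)
    (hR : R.Nodup) (hS : S.Nodup) (hsub : ∀ x ∈ S, x ∈ R)
    (hzero : ∀ x ∈ R, x ∉ S → f x = 0) :
    (R.map f).sum = (S.map f).sum := by
  have hperm : List.Perm (R.filter (fun x => decide (x ∈ S))) S := by
    rw [List.perm_ext_iff_of_nodup (hR.filter _) hS]
    intro a
    simp only [List.mem_filter, decide_eq_true_eq]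
    exact ⟨fun h => h.2, fun h => ⟨hsub a h, h⟩⟩
  have hsplit : ((R.filter (fun x => decide (x ∈ S)) ++ R.filter (fun x => !decide (x ∈ S)))).Perm R :=
    List.filter_append_perm _ R
  calc (R.map f).sum
      = ((R.filter (fun x => decide (x ∈ S)) ++ R.filter (fun x => !decide (x ∈ S))).map f).sum :=
        ((hsplit.map f).sum_eq).symm
    _ = ((R.filter (fun x => decide (x ∈ S))).map f).sum
        + ((R.filter (fun x => !decide (x ∈ S))).map f).sum := by
        rw [List.map_append, List.sum_append]
    _ = ((R.filter (fun x => decide (x ∈ S))).map f).sum := by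
        have : ((R.filter (fun x => !decide (x ∈ S))).map f).sum = 0 := by
          apply List.sum_eq_zero
          intro x hx
          simp only [List.mem_map, List.mem_filter, Bool.not_eq_true', decide_eq_false_iff_not] at hx
          obtain ⟨y, ⟨hyR, hyS⟩, rfl⟩ := hx
          exact hzero y hyR hyS
        rw [this, add_zero]
    _ = (S.map f).sum := (hperm.map f).sum_eq

lemma pvScoreA_eq_zero (L : PySem.Set (Int × Int)) (i j : Int)
    (h1 : (i, j) ∉ L) (h2 : (i, j + 1) ∉ L) (h3 : (i + 1, j) ∉ L) (h4 : (i + 1, j + 1) ∉ L) :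
    pvScoreA L i j = 0 := by
  simp [pvScoreA, pvTestA, h1, h2, h3, h4]

lemma pvMem_flatMap_of_corner (L : PySem.Set (Int × Int)) (w : Int × Int)
    (hw1 : -1 ≤ w.1) (hw2 : -1 ≤ w.2)
    (h : (w.1, w.2) ∈ L ∨ (w.1, w.2 + 1) ∈ L ∨ (w.1 + 1, w.2) ∈ L ∨ (w.1 + 1, w.2 + 1) ∈ L) :
    w ∈ L.flatMap pvCand := by
  rcases h with h | h | h | h <;>
  exact List.mem_flatMap.mpr ⟨_, h, by simp [pvCand, Prod.ext_iff]; omega⟩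

lemma pvMem_rect (mx my : Int) (w : Int × Int) :
    w ∈ pvRect mx my ↔ (-1 ≤ w.1 ∧ w.1 < mx + 1) ∧ (-1 ≤ w.2 ∧ w.2 < my + 1) := by
  simp [pvRect, List.mem_flatMap, List.mem_map, PySem.List.mem_pyRange_one, Prod.ext_iff]

lemma pvRect_nodup (mx my : Int) : (pvRect mx my).Nodup := by
  have := List.Nodup.product (PySem.List.nodup_pyRange_one (0 - 1) (mx + 1))
    (PySem.List.nodup_pyRange_one (0 - 1) (my + 1))
  simpa [pvRect, List.product] using this

lemma pvMain (locations : List (Int × Int)) (mx my : Int)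
    (hmx : PySem.List.max? ((PySem.Set.ofList locations).map (fun p => p.1)) (fun x => x) = some mx)
    (hmy : PySem.List.max? ((PySem.Set.ofList locations).map (fun p => p.2)) (fun x => x) = some my) :
    ((pvRect mx my).map (fun w => pvScoreA (PySem.Set.ofList locations) w.1 w.2)).sum
    = ((PySem.Set.ofList ((PySem.Set.ofList locations).flatMap pvCand)).map
        (fun w => pvScoreA (PySem.Set.ofList locations) w.1 w.2)).sum := by
  apply pvSum_eq_of_zero_off
  · -- nodup of the rectangle
    exact pvRect_nodup mx my
  · exact PySem.Set.nodup_ofList _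
  · -- every collected window lies in the scanned rectangle
    intro w hw
    rw [PySem.Set.mem_ofList] at hw
    obtain ⟨p, hp, hc⟩ := List.mem_flatMap.mp hw
    have hx : p.1 ≤ mx := PySem.List.max?_isMax hmx p.1 (List.mem_map.mpr ⟨p, hp, rfl⟩)
    have hy : p.2 ≤ my := PySem.List.max?_isMax hmy p.2 (List.mem_map.mpr ⟨p, hp, rfl⟩)
    rw [pvMem_rect]
    simp [pvCand, Prod.ext_iff] at hc
    omega
  · -- the score of a window not adjacent to any cell is 0
    intro w hw hnot
    rw [pvMem_rect] at hw
    apply pvScoreA_eq_zero <;>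
      exact fun h => hnot ((PySem.Set.mem_ofList _ _).mpr
        (pvMem_flatMap_of_corner _ w (by omega) (by omega) (by tauto)))

-- ===== VERDICT (by name: the statement is the Claim_ definition above) =====
theorem calculate_sides_spec : Claim_equal_calculate_sides := by
  intro locations _ hPre
  unfold Spec_calculate_sides
  have hne : PySem.Set.ofList locations ≠ [] := by
    cases locations with
    | nil => exact absurd rfl hPre
    | cons p t => simp [PySem.Set.ofList_cons]
  obtain ⟨mx, hmx⟩ : ∃ mx, PySem.List.max? ((PySem.Set.ofList locations).map (fun p => p.1))
      (fun x => x) = some mx := by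
    cases h : PySem.List.max? ((PySem.Set.ofList locations).map (fun p => p.1)) (fun x => x) with
    | none =>
        rw [PySem.List.max?_eq_none_iff] at h
        exact absurd (List.map_eq_nil_iff.mp h) hne
    | some m => exact ⟨m, rfl⟩
  obtain ⟨my, hmy⟩ : ∃ my, PySem.List.max? ((PySem.Set.ofList locations).map (fun p => p.2))
      (fun x => x) = some my := by
    cases h : PySem.List.max? ((PySem.Set.ofList locations).map (fun p => p.2)) (fun x => x) with
    | none =>
        rw [PySem.List.max?_eq_none_iff] at h
        exact absurd (List.map_eq_nil_iff.mp h) hne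
    | some m => exact ⟨m, rfl⟩
  simp only [calculate_sides, calculate_sides_alt]
  rw [hmx, hmy]
  simp only [pvStep]
  rw [pvFoldl_cand, pvA_fold_sum]
  have hofl : ((PySem.Set.ofList locations).flatMap pvCand).foldl PySem.Set.add PySem.Set.empty
      = PySem.Set.ofList ((PySem.Set.ofList locations).flatMap pvCand) := rfl
  rw [hofl, pvB_fold_sum]
  exact pvMain locations mx my hmx hmy
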